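-- pv_equiv track=rewrite | github.com/didim99/blender-autotest | common.py | str2ms
-- ===== SOURCE A (Python) =====
-- def str2ms(ts: str) -> int:
--     ts = reversed(ts.split(':'))
--     res = 0
--
--     for r, t in enumerate(ts):
--         if '.' in t:
--             t = t.split('.')
--             t = int(t[0]) * 1000 + int(t[1]) * 10
--         else:
--             t = int(t) * 1000
--         res += t * 60 ** r
--
--     return res
-- ===== SOURCE B (Python) =====
-- def _token_ms(tok: str) -> int:
--     if '.' in tok:
--         parts = tok.split('.')
--         return int(parts[0]) * 1000 + int(parts[1]) * 10
--     return int(tok) * 1000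
--
--
-- def str2ms(ts: str) -> int:
--     res = 0
--     for tok in ts.split(':'):
--         res = res * 60 + _token_ms(tok)
--     return res
-- ===== Notes on version B (the rewrite author's own statement) =====
-- stated objective: simpler
-- what changed: Replaces the reversed/enumerate loop that sums tokens weighted by 60**r with a forward Horner fold (res = res*60 + token_ms), removing the reversal, the index and the exponentiation.
import Mathlib
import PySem

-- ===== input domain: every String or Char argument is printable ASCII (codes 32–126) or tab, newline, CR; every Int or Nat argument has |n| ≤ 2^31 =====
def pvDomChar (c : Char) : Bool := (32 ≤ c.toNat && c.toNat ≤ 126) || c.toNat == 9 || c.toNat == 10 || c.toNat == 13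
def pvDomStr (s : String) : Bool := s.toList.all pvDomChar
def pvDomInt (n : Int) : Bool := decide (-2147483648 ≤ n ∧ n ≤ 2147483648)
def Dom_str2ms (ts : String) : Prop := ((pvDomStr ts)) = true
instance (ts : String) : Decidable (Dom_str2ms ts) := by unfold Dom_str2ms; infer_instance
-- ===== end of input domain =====

-- B is a forward Horner fold over the colon-separated tokens instead of A's reversed/enumerate sum weighted by 60**r.
-- Both ports read int() via PySem.Int.ofStr? with .getD 0; Pre_ excludes the inputs where Python int() raises, on which both programs raise.

-- ===== PORT A =====
-- A: reversed token list, enumerate, res += token_ms * 60 ** r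
def str2ms (ts : String) : Int :=
  let parts := ((PySem.Str.split? ts ":").getD []).reverse
  (PySem.List.enumerate parts).foldl
    (fun res rt =>
      let t := rt.2
      let v : Int :=
        if PySem.Str.isIn "." t then
          let p := (PySem.Str.split? t ".").getD []
          ((PySem.Int.ofStr? (p.getD 0 "")).getD 0) * 1000 +
          ((PySem.Int.ofStr? (p.getD 1 "")).getD 0) * 10
        else ((PySem.Int.ofStr? t).getD 0) * 1000
      res + v * 60 ^ rt.1.toNat) 0

-- ===== PORT B =====
-- helper for B: milliseconds of one token
def tokenMs (t : String) : Int :=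
  if PySem.Str.isIn "." t then
    let p := (PySem.Str.split? t ".").getD []
    ((PySem.Int.ofStr? (p.getD 0 "")).getD 0) * 1000 +
    ((PySem.Int.ofStr? (p.getD 1 "")).getD 0) * 10
  else ((PySem.Int.ofStr? t).getD 0) * 1000

def str2ms_alt (ts : String) : Int :=
  ((PySem.Str.split? ts ":").getD []).foldl (fun res tok => res * 60 + tokenMs tok) 0

-- ===== PRECONDITION & SPEC =====
-- Pre_: every colon-separated token parses via int() (both pieces around the first dot when a dot is present);
-- exactly the inputs on which Python A (and B) return instead of raising.
def Pre_str2ms (ts : String) : Prop :=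
  (((PySem.Str.split? ts ":").getD []).all fun t =>
    if PySem.Str.isIn "." t then
      (PySem.Int.ofStr? (((PySem.Str.split? t ".").getD []).getD 0 "")).isSome &&
      (PySem.Int.ofStr? (((PySem.Str.split? t ".").getD []).getD 1 "")).isSome
    else (PySem.Int.ofStr? t).isSome) = true
instance (ts : String) : Decidable (Pre_str2ms ts) := by unfold Pre_str2ms; infer_instance

def pvWitness_str2ms : String := "1:02:03.5"

def Spec_str2ms (ts : String) (out : Int) : Prop := out = str2ms_alt ts
instance (ts : String) (out : Int) : Decidable (Spec_str2ms ts out) := by unfold Spec_str2ms; infer_instance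

-- ===== CLAIM (what is proved, stated in full; the proofs are below) =====
def Claim_equal_str2ms : Prop := ∀ (ts : String), Dom_str2ms ts → Pre_str2ms ts → Spec_str2ms ts (str2ms ts)

-- ===== LEMMAS AND PROOFS =====

-- Horner fold with an arbitrary accumulator
theorem horner_acc (l : List String) : ∀ a : Int,
    l.foldl (fun res tok => res * 60 + tokenMs tok) a
      = a * 60 ^ l.length + l.foldl (fun res tok => res * 60 + tokenMs tok) 0 := by
  induction l with
  | nil => intro a; simp
  | cons x l ih =>
    intro a
    simp only [List.foldl_cons, List.length_cons]
    rw [ih (a * 60 + tokenMs x), ih (0 * 60 + tokenMs x)]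
    ring

-- A's body on one enumerated pair equals tokenMs weighted by 60^r
theorem key_fold (l : List String) :
    (PySem.List.enumerate l.reverse).foldl
      (fun res rt => res + tokenMs rt.2 * 60 ^ rt.1.toNat) 0
      = l.foldl (fun res tok => res * 60 + tokenMs tok) 0 := by
  induction l with
  | nil => simp
  | cons x l ih =>
    simp only [List.reverse_cons, List.foldl_cons]
    rw [PySem.List.enumerate_append, List.foldl_append]
    simp only [PySem.List.enumerate_cons, PySem.List.enumerate_nil, List.foldl_cons,
      List.foldl_nil, List.length_reverse]
    rw [ih, horner_acc l (0 * 60 + tokenMs x)]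
    simp [Int.toNat_natCast]
    ring

theorem str2ms_eq_alt (ts : String) : str2ms ts = str2ms_alt ts := by
  unfold str2ms str2ms_alt
  rw [← key_fold]
  apply PySem.List.foldl_congr_mem
  intro acc rt _
  simp only [tokenMs]

-- ===== VERDICT (by name: the statement is the Claim_ definition above) =====
theorem str2ms_spec : Claim_equal_str2ms := by
  intro ts _ _
  exact str2ms_eq_alt ts
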